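-- pv_equiv track=rewrite | github.com/zhfreal/cloudflare-ddns | src/cloudflare_ddns.py | sort_zones
-- ===== SOURCE A (Python) =====
-- def sort_zones(zones: list):
--     if len(zones) == 0:
--         return []
--     t_dict = {}
--     t_sorted = []
--     zones = list(set([str(zone).strip().strip('.') for zone in zones]))
--     for zone in zones:
--         t_zone_list = str(zone).split('.')
--         t_len = len(t_zone_list)
--         if t_len not in t_dict:
--             t_dict[t_len] = []
--         t_dict[t_len].append(zone)
--     t_key = list(t_dict.keys())
--     t_key.sort(reverse=True)
--     for k in t_key:
--         t_dict[k].sort()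
--         t_sorted.extend(t_dict[k])
--     return t_sorted
-- ===== SOURCE B (Python) =====
-- def sort_zones(zones: list):
--     cleaned = {str(z).strip().strip('.') for z in zones}
--     return sorted(cleaned, key=lambda s: (-len(s.split('.')), s))
-- ===== Notes on version B (the rewrite author's own statement) =====
-- stated objective: simpler
-- what changed: Replaces A's group-by-component-count dict plus a descending key sort plus one alphabetical sort per bucket with a single sorted() over the deduplicated cleaned names using the compound key (-len(s.split('.')), s).
import Mathlib
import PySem

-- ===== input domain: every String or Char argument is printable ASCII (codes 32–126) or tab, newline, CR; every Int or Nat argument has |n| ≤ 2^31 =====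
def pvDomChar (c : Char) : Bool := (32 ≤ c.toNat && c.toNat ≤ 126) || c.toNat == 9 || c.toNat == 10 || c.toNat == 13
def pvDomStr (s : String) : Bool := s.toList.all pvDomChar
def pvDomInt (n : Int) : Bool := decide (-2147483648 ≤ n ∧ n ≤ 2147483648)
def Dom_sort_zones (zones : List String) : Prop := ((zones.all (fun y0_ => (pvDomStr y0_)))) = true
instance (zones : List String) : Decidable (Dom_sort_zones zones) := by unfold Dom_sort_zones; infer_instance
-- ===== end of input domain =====

-- B replaces A's group-by-component-count dict (+ descending key sort + per-bucket sorts)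
-- with one sorted() over the deduplicated set using the compound key (-len(s.split('.')), s); objective: simpler.

-- shared helper: str(zone).strip().strip('.')  (both Pythons clean zones with this same expression)
def pvClean (z : String) : String := PySem.Str.stripChars (PySem.Str.strip z) "."

-- len(str(zone).split('.')) as an Int; the separator '.' is a nonempty literal, so Python never
-- raises and PySem.Chars.splitOn (the sep ≠ "" form of str.split) is exact here.
def pvDepth (z : String) : Int := ((PySem.Chars.splitOn z.toList ['.']).length : Int)

-- ===== PORT A =====
-- Python iterates the set in hash order, but each dict bucket is sorted before output and buckets
-- are keyed by component count, so the result is independent of that order; the port uses the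
-- Set's first-insertion order.
def sort_zones (zones : List String) : List String :=
  if zones.length = 0 then []
  else
    let zs : PySem.Set String := PySem.Set.ofList (zones.map (fun zone => pvClean zone))
    let d : PySem.Dict Int (List String) :=
      zs.foldl (fun d zone =>
        let tlen : Int := pvDepth zone
        let d := if d.contains tlen then d else d.insert tlen []
        d.modify tlen [] (fun b => b ++ [zone])) PySem.Dict.empty
    let tkey := PySem.List.sorted d.keys (fun k => k) true
    tkey.foldl (fun acc k => acc ++ PySem.List.sorted (d.getD k []) (fun z => z) false) []

-- ===== PORT B =====
-- sorted(cleaned, key=lambda s: (-len(s.split('.')), s)): the key is injective on the distinct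
-- cleaned names, so the result does not depend on the set's iteration order.
def sort_zones_alt (zones : List String) : List String :=
  let cleaned : PySem.Set String := PySem.Set.ofList (zones.map (fun z => pvClean z))
  PySem.List.sorted2 cleaned (fun s => -(pvDepth s)) (fun s => s) false

-- ===== PRECONDITION & SPEC =====
def Spec_sort_zones (zones : List String) (out : List String) : Prop := out = sort_zones_alt zones
instance (zones : List String) (out : List String) : Decidable (Spec_sort_zones zones out) := by unfold Spec_sort_zones; infer_instance

-- ===== CLAIM (what is proved, stated in full; the proofs are below) =====
def Claim_equal_sort_zones : Prop := ∀ (zones : List String), Dom_sort_zones zones → Spec_sort_zones zones (sort_zones zones)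

-- ===== LEMMAS AND PROOFS =====

-- one step of A's dict-building loop
def pvStep (d : PySem.Dict Int (List String)) (zone : String) : PySem.Dict Int (List String) :=
  let tlen : Int := pvDepth zone
  let d := if d.contains tlen then d else d.insert tlen []
  d.modify tlen [] (fun b => b ++ [zone])

lemma pvStep_keys (d : PySem.Dict Int (List String)) (z : String) :
    (pvStep d z).keys = PySem.Set.add d.keys (pvDepth z) := by
  unfold pvStep
  by_cases hc : d.contains (pvDepth z) = true
  · simp only [hc, if_pos]
    rw [PySem.Dict.keys_modify, PySem.Dict.keys_insert_of_contains d _ hc,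
      PySem.Set.add_of_mem ((PySem.Dict.contains_iff_mem_keys d (pvDepth z)).mp hc)]
  · simp only [hc, if_neg, Bool.false_eq_true, not_false_iff]
    rw [PySem.Dict.keys_modify, PySem.Dict.keys_insert_of_contains (d.insert (pvDepth z) []) _
      (PySem.Dict.contains_insert_self d (pvDepth z) []),
      PySem.Dict.keys_insert_of_not_contains d [] (by simpa using hc),
      PySem.Set.add_of_not_mem (fun hm => hc ((PySem.Dict.contains_iff_mem_keys d (pvDepth z)).mpr hm))]

lemma pvStep_getD (d : PySem.Dict Int (List String)) (z : String) (c : Int) :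
    (pvStep d z).getD c [] = d.getD c [] ++ (if pvDepth z = c then [z] else []) := by
  unfold pvStep
  by_cases hc : d.contains (pvDepth z) = true
  · simp only [hc, if_pos]
    rw [PySem.Dict.getD_modify]
    by_cases h : c = pvDepth z
    · simp [h]
    · simp [h, Ne.symm h]
  · simp only [hc, if_neg, Bool.false_eq_true, not_false_iff]
    rw [PySem.Dict.getD_modify]
    by_cases h : c = pvDepth z
    · subst h
      simp [PySem.Dict.getD_insert_self, PySem.Dict.getD_of_not_contains d [] (by simpa using hc)]
    · simp [h, Ne.symm h, PySem.Dict.getD_insert_of_ne d [] [] h]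

lemma pvFold_keys (l : List String) : ∀ d : PySem.Dict Int (List String),
    (l.foldl pvStep d).keys = PySem.Set.update d.keys (l.map pvDepth) := by
  induction l with
  | nil => intro d; simp [PySem.Set.update]
  | cons z t ih =>
    intro d
    rw [List.foldl_cons, ih, List.map_cons, PySem.Set.update_cons, pvStep_keys]

lemma pvFold_getD (l : List String) : ∀ (d : PySem.Dict Int (List String)) (c : Int),
    (l.foldl pvStep d).getD c [] = d.getD c [] ++ l.filter (fun z => decide (pvDepth z = c)) := by
  induction l with
  | nil => intro d c; simp
  | cons z t ih =>
    intro d c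
    rw [List.foldl_cons, ih, pvStep_getD, List.filter_cons]
    by_cases h : pvDepth z = c <;> simp [h]

-- partition: flatMapping sorted per-key filters over a nodup cover of the keys is a permutation
lemma pvPartition_perm (K : List Int) : ∀ (S : List String), K.Nodup → (∀ z ∈ S, pvDepth z ∈ K) →
    (K.flatMap (fun k => PySem.List.sorted (S.filter (fun z => decide (pvDepth z = k))) (fun z => z) false)).Perm S := by
  induction K with
  | nil =>
    intro S _ h
    cases S with
    | nil => simp
    | cons z t => exact absurd (h z (by simp)) (by simp)
  | cons k K ih =>
    intro S hnd h
    rw [List.flatMap_cons]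
    have hk : k ∉ K := (List.nodup_cons.mp hnd).1
    have hrw : ∀ k' ∈ K,
        S.filter (fun z => decide (pvDepth z = k')) =
        (S.filter (fun z => !decide (pvDepth z = k))).filter (fun z => decide (pvDepth z = k')) := by
      intro k' hk'
      rw [List.filter_filter]
      apply List.filter_congr
      intro z _
      by_cases hz : pvDepth z = k'
      · simp [hz, show ¬ k' = k from fun e => hk (e ▸ hk')]
      · simp [hz]
    have hIH := ih (S.filter (fun z => !decide (pvDepth z = k))) (List.nodup_cons.mp hnd).2
      (by
        intro z hz
        rw [List.mem_filter] at hz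
        have := h z hz.1
        rcases List.mem_cons.mp this with heq | hm
        · exact absurd (decide_eq_true heq) (by simpa using hz.2)
        · exact hm)
    have hbody : K.flatMap (fun k' => PySem.List.sorted (S.filter (fun z => decide (pvDepth z = k'))) (fun z => z) false)
        = K.flatMap (fun k' => PySem.List.sorted ((S.filter (fun z => !decide (pvDepth z = k))).filter (fun z => decide (pvDepth z = k'))) (fun z => z) false) := by
      apply List.flatMap_congr
      intro k' hk'
      rw [hrw k' hk']
    rw [hbody]
    exact ((PySem.List.sorted_perm _ _ _).append hIH).trans
      (List.filter_append_perm (fun z => decide (pvDepth z = k)) S)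

-- sorted2 with linear-order keys is sorted with the lexicographic product key
lemma pvSorted2_eq_sorted_toLex {α κ₁ κ₂ : Type} [LinearOrder κ₁] [LinearOrder κ₂]
    (xs : List α) (k1 : α → κ₁) (k2 : α → κ₂) :
    PySem.List.sorted2 xs k1 k2 false = PySem.List.sorted xs (fun x => toLex (k1 x, k2 x)) false := by
  unfold PySem.List.sorted2 PySem.List.sorted
  simp only [Bool.false_eq_true, if_neg, not_false_iff]
  have hb : (fun (a b : α) => decide (k1 a < k1 b) || (!decide (k1 b < k1 a) && decide (k2 a < k2 b)))
      = fun a b => decide (toLex (k1 a, k2 a) < toLex (k1 b, k2 b)) := by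
    funext a b
    rw [Bool.eq_iff_iff]
    simp only [Bool.or_eq_true, Bool.and_eq_true, Bool.not_eq_true', decide_eq_true_eq,
      decide_eq_false_iff_not, Prod.Lex.lt_iff]
    constructor
    · rintro (h | ⟨h1, h2⟩)
      · exact Or.inl h
      · rcases lt_trichotomy (k1 a) (k1 b) with h' | h' | h'
        · exact Or.inl h'
        · exact Or.inr ⟨h', h2⟩
        · exact absurd h' h1
    · rintro (h | ⟨h1, h2⟩)
      · exact Or.inl h
      · exact Or.inr ⟨fun hlt => absurd h1 (ne_of_gt hlt), h2⟩
  rw [hb]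

lemma pvNodup_sorted (xs : List String) (key : String → String) (rev : Bool) (h : xs.Nodup) :
    (PySem.List.sorted xs key rev).Nodup :=
  ((PySem.List.sorted_perm xs key rev).nodup_iff).mpr h

-- the main equivalence
theorem pvMain (zones : List String) : sort_zones zones = sort_zones_alt zones := by
  by_cases hz : zones.length = 0
  · have : zones = [] := List.length_eq_zero_iff.mp hz
    subst this
    rfl
  · unfold sort_zones sort_zones_alt
    rw [if_neg hz]
    set S : List String := PySem.Set.ofList (zones.map (fun z => pvClean z)) with hSdef
    have hS : S.Nodup := PySem.Set.nodup_ofList _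
    show (List.foldl (fun acc k => acc ++ PySem.List.sorted ((List.foldl pvStep PySem.Dict.empty S).getD k []) (fun z => z) false) []
        (PySem.List.sorted (List.foldl pvStep PySem.Dict.empty S).keys (fun k => k) true))
      = PySem.List.sorted2 S (fun s => -(pvDepth s)) (fun s => s) false
    have hdk : (List.foldl pvStep PySem.Dict.empty S).keys = PySem.Set.ofList (S.map pvDepth) := by
      rw [pvFold_keys, PySem.Dict.keys_empty, PySem.Set.update_nil_left]
    have hdg : ∀ c, (List.foldl pvStep PySem.Dict.empty S).getD c [] = S.filter (fun z => decide (pvDepth z = c)) := by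
      intro c; rw [pvFold_getD]; simp
    rw [hdk, PySem.List.foldl_append_eq_flatMap, List.nil_append,
      List.flatMap_congr (fun k _ => by rw [hdg k])]
    set K : List Int := PySem.List.sorted (PySem.Set.ofList (S.map pvDepth)) (fun k => k) true with hK
    set g : Int → List String := fun k => PySem.List.sorted (S.filter (fun z => decide (pvDepth z = k))) (fun z => z) false with hg
    have hKperm : K.Perm (PySem.Set.ofList (S.map pvDepth)) := by
      rw [hK]; exact PySem.List.sorted_perm _ _ _
    have hKnd : K.Nodup := hKperm.nodup_iff.mpr (PySem.Set.nodup_ofList _)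
    have hKmem : ∀ z ∈ S, pvDepth z ∈ K := by
      intro z hzS
      exact hKperm.mem_iff.mpr ((PySem.Set.mem_ofList _ _).mpr (List.mem_map_of_mem hzS))
    -- B is a plain sort under the lexicographic key
    rw [pvSorted2_eq_sorted_toLex S _ _]
    -- A's output is a strictly lex-increasing permutation of S
    have hperm : (K.flatMap g).Perm S := pvPartition_perm K S hKnd hKmem
    have hmemg : ∀ k x, x ∈ g k → pvDepth x = k := by
      intro k x hx
      rw [hg] at hx
      have := (PySem.List.mem_sorted _ _ _ _).mp hx
      simpa using (List.mem_filter.mp this).2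
    have hpw : (K.flatMap g).Pairwise (fun a b => (fun s => toLex (-(pvDepth s), s)) a < (fun s => toLex (-(pvDepth s), s)) b) := by
      rw [List.pairwise_flatMap]
      constructor
      · intro k _
        have h1 : (g k).Pairwise (fun a b : String => a ≤ b) := by
          rw [hg]; exact PySem.List.sorted_pairwise _ _
        have h2 : (g k).Pairwise (fun a b : String => a ≠ b) := by
          rw [hg]; exact pvNodup_sorted _ _ _ (hS.filter _)
        apply (h1.and h2).imp_of_mem
        intro a b ha hb hab
        simp only [Prod.Lex.lt_iff, ofLex_toLex]
        exact Or.inr ⟨by simp [hmemg k a ha, hmemg k b hb], lt_of_le_of_ne hab.1 hab.2⟩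
      · have h1 : K.Pairwise (fun a b : Int => b ≤ a) := by
          rw [hK]; exact PySem.List.sorted_pairwise_rev _ _
        have h2 : K.Pairwise (fun a b : Int => a ≠ b) := hKnd
        apply (h1.and h2).imp_of_mem
        intro k1 k2 _ _ hk12 x hx y hy
        simp only [Prod.Lex.lt_iff, ofLex_toLex]
        refine Or.inl ?_
        have hlt : k2 < k1 := lt_of_le_of_ne hk12.1 (Ne.symm hk12.2)
        simp only [hmemg k1 x hx, hmemg k2 y hy]
        omega
    exact (PySem.List.sorted_eq_of_perm_of_pairwise_lt S (K.flatMap g) _ hperm hpw).symm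

-- ===== VERDICT (by name: the statement is the Claim_ definition above) =====
theorem sort_zones_spec : Claim_equal_sort_zones := by
  intro zones _
  unfold Spec_sort_zones
  exact pvMain zones
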